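-- pv_equiv track=rewrite | github.com/Larain05/CoinToss-Group6 | graphs/group6.py | cumulative
-- ===== SOURCE A (Python) =====
-- def cumulative(H_list):
--     cumH, cumT = [], []
--     h_sum, t_sum = 0, 0
--     for h in H_list:
--         h_sum += h
--         t_sum += (1 - h)
--         cumH.append(h_sum)
--         cumT.append(t_sum)
--     return cumH, cumT
-- ===== SOURCE B (Python) =====
-- def cumulative(H_list):
--     cumH = []
--     s = 0
--     for h in H_list:
--         s += h
--         cumH.append(s)
--     cumT = [(i + 1) - c for i, c in enumerate(cumH)]
--     return cumH, cumT
-- ===== Notes on version B (the rewrite author's own statement) =====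
-- stated objective: simpler
-- what changed: B maintains a single running sum for cumH and derives cumT from the identity cumT[i] = (i+1) - cumH[i] via enumerate, instead of A's two parallel accumulators updated in one loop.
import Mathlib
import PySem

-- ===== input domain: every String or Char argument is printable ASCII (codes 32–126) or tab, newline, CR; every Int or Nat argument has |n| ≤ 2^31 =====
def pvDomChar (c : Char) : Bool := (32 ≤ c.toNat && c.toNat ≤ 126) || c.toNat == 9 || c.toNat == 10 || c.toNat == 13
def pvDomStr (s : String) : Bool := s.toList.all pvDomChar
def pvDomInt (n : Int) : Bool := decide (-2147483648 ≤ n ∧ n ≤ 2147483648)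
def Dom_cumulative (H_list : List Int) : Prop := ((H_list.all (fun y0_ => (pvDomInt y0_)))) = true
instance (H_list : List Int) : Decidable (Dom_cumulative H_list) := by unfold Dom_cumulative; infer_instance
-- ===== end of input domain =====

-- B keeps one running sum and derives cumT by the index identity cumT[i] = (i+1) - cumH[i] (simpler decomposition).


-- ===== PORT A =====
-- loop over H_list carrying (cumH, cumT, h_sum, t_sum), appending to both lists each step
def cumulativeAux : List Int → List Int → List Int → Int → Int → List Int × List Int
  | [], cumH, cumT, _, _ => (cumH, cumT)
  | h :: rest, cumH, cumT, h_sum, t_sum =>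
      cumulativeAux rest (cumH ++ [h_sum + h]) (cumT ++ [t_sum + (1 - h)]) (h_sum + h) (t_sum + (1 - h))

def cumulative (H_list : List Int) : List Int × List Int :=
  cumulativeAux H_list [] [] 0 0

-- ===== PORT B =====
-- single running prefix sum (the loop in Source B)
def pvPrefix (s : Int) : List Int → List Int
  | [] => []
  | h :: t => (s + h) :: pvPrefix (s + h) t

def cumulative_alt (H_list : List Int) : List Int × List Int :=
  let cumH := pvPrefix 0 H_list
  let cumT := (PySem.List.enumerate cumH 0).map (fun p => (p.1 + 1) - p.2)
  (cumH, cumT)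

-- ===== PRECONDITION & SPEC =====
def Spec_cumulative (H_list : List Int) (out : List Int × List Int) : Prop := out = cumulative_alt H_list
instance (H_list : List Int) (out : List Int × List Int) : Decidable (Spec_cumulative H_list out) := by unfold Spec_cumulative; infer_instance

-- ===== CLAIM (what is proved, stated in full; the proofs are below) =====
def Claim_equal_cumulative : Prop := ∀ (H_list : List Int), Dom_cumulative H_list → Spec_cumulative H_list (cumulative H_list)

-- ===== LEMMAS AND PROOFS =====
theorem cumulativeAux_closed (l : List Int) : ∀ (cumH cumT : List Int) (hs ts : Int),
    cumulativeAux l cumH cumT hs ts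
      = (cumH ++ pvPrefix hs l, cumT ++ pvPrefix ts (l.map (fun h => 1 - h))) := by
  induction l with
  | nil => intro cumH cumT hs ts; simp [cumulativeAux, pvPrefix]
  | cons h rest ih =>
      intro cumH cumT hs ts
      simp [cumulativeAux, pvPrefix, ih]

theorem pvPrefix_tails (l : List Int) : ∀ (s t : Int),
    pvPrefix t (l.map (fun h => 1 - h))
      = (PySem.List.enumerate (pvPrefix s l) (t + s)).map (fun p => (p.1 + 1) - p.2) := by
  induction l with
  | nil => intro s t; simp [pvPrefix, PySem.List.enumerate_nil]
  | cons h rest ih =>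
      intro s t
      simp only [List.map, pvPrefix, PySem.List.enumerate_cons, List.map_cons]
      have harg : t + (1 - h) + (s + h) = t + s + 1 := by ring
      rw [ih (s + h) (t + (1 - h)), harg]
      congr 1
      omega

-- ===== VERDICT (by name: the statement is the Claim_ definition above) =====
theorem cumulative_spec : Claim_equal_cumulative := by
  intro H_list _
  unfold Spec_cumulative cumulative cumulative_alt
  rw [cumulativeAux_closed, pvPrefix_tails H_list 0 0]
  simp
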